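-- pv_equiv track=rewrite | github.com/amcintosh994-beep/zork-i-cartographic-atlas | scripts/normalize_rooms_fixed.py | parse_string_section
-- ===== SOURCE A (Python) =====
-- from typing import Dict, List, Tuple, Optional
--
-- def parse_string_section(raw_lines: List[str]) -> str:
--     """
--     Join raw lines into a paragraph-preserving string.
--     Strip leading/trailing blank lines but keep internal newlines.
--     """
--     # trim blank edges
--     start = 0
--     end = len(raw_lines)
--     while start < end and raw_lines[start].strip() == "":
--         start += 1
--     while end > start and raw_lines[end - 1].strip() == "":
--         end -= 1
--     return "\n".join(raw_lines[start:end]).strip()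
-- ===== SOURCE B (Python) =====
-- def parse_string_section(raw_lines):
--     """
--     Join raw lines into a paragraph-preserving string.
--     Strip leading/trailing blank lines but keep internal newlines.
--     """
--     # The final strip() already removes edge-blank lines joined by "\n",
--     # so no explicit boundary scans are needed.
--     return "\n".join(raw_lines).strip()
-- ===== Notes on version B (the rewrite author's own statement) =====
-- stated objective: simpler
-- what changed: Replaces A's two explicit boundary-pointer while-loops and the slice with a single expression: join all lines and let str.strip remove the edge-blank lines together with surrounding whitespace.
import Mathlib
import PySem

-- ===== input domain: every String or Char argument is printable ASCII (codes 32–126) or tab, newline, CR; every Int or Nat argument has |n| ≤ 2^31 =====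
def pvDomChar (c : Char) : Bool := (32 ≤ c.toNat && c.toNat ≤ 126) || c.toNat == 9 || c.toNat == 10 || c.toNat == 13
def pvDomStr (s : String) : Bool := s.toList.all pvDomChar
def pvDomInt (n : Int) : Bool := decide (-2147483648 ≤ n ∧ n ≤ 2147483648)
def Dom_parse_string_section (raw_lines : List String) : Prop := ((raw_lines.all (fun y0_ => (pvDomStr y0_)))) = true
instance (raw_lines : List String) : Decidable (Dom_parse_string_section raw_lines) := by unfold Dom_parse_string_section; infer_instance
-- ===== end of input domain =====

-- B replaces A's two boundary-pointer loops and slice with a single "\n".join(raw_lines).strip() expression (simpler decomposition, same result).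


-- ===== PORT A =====
-- A: trim blank edge lines with two index-pointer loops, slice, join, strip.
-- while start < end and raw_lines[start].strip() == "": start += 1
def parse_string_section_startloop (raw_lines : List String) (endv start : Nat) : Nat :=
  if _h : start < endv then
    if PySem.Str.strip ((PySem.List.pyGet? raw_lines (start : Int)).getD "") == "" then
      parse_string_section_startloop raw_lines endv (start + 1)
    else start
  else start
termination_by endv - start

-- while end > start and raw_lines[end - 1].strip() == "": end -= 1
def parse_string_section_endloop (raw_lines : List String) (start endv : Nat) : Nat :=
  if _h : start < endv then
    if PySem.Str.strip ((PySem.List.pyGet? raw_lines ((endv : Int) - 1)).getD "") == "" then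
      parse_string_section_endloop raw_lines start (endv - 1)
    else endv
  else endv
termination_by endv

-- start = first loop's result, end = second loop's result; return "\n".join(raw_lines[start:end]).strip()
def parse_string_section (raw_lines : List String) : String :=
  PySem.Str.strip (PySem.Str.join "\n"
    (PySem.List.slice raw_lines
      (some ((parse_string_section_startloop raw_lines raw_lines.length 0 : Nat) : Int))
      (some ((parse_string_section_endloop raw_lines
        (parse_string_section_startloop raw_lines raw_lines.length 0) raw_lines.length : Nat) : Int))))

-- ===== PORT B =====
-- B: one expression — "\n".join(raw_lines).strip().
def parse_string_section_alt (raw_lines : List String) : String :=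
  PySem.Str.strip (PySem.Str.join "\n" raw_lines)

-- ===== PRECONDITION & SPEC =====
def Spec_parse_string_section (raw_lines : List String) (out : String) : Prop := out = parse_string_section_alt raw_lines
instance (raw_lines : List String) (out : String) : Decidable (Spec_parse_string_section raw_lines out) := by unfold Spec_parse_string_section; infer_instance

-- ===== CLAIM (what is proved, stated in full; the proofs are below) =====
def Claim_equal_parse_string_section : Prop := ∀ (raw_lines : List String), Dom_parse_string_section raw_lines → Spec_parse_string_section raw_lines (parse_string_section raw_lines)

-- ===== LEMMAS AND PROOFS =====

-- blank-line predicates, at String and List Char level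
def pvBlankS (s : String) : Bool := PySem.Str.strip s == ""
def pvBlankC (l : List Char) : Bool := PySem.Chars.strip l == []

theorem pvBlankS_eq (s : String) : pvBlankS s = pvBlankC s.toList := by
  simp only [pvBlankS, pvBlankC, PySem.Str.strip]
  rcases hm : PySem.Chars.strip s.toList with _ | ⟨c, cs⟩
  · rfl
  · have h1 : String.ofList (c :: cs) ≠ "" := by
      intro heq
      have := congrArg String.toList heq
      simp at this
    rw [beq_eq_false_iff_ne.mpr h1]
    simp

theorem pvBlankC_iff (l : List Char) :
    pvBlankC l = true ↔ ∀ c ∈ l, PySem.Chars.isspace c = true := by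
  simp only [pvBlankC, beq_iff_eq, PySem.Chars.strip, PySem.Chars.rstrip, PySem.Chars.lstrip]
  constructor
  · intro h c hc
    have h2 : List.dropWhile PySem.Chars.isspace
        (List.dropWhile PySem.Chars.isspace l).reverse = [] :=
      List.reverse_eq_nil_iff.mp h
    have h3 := List.dropWhile_eq_nil_iff.mp h2
    have h4 : ∀ x ∈ List.dropWhile PySem.Chars.isspace l, PySem.Chars.isspace x = true := by
      intro x hx
      exact h3 x (List.mem_reverse.mpr hx)
    rw [← List.takeWhile_append_dropWhile (p := PySem.Chars.isspace) (l := l)] at hc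
    rcases List.mem_append.mp hc with h5 | h5
    · exact List.mem_takeWhile_imp h5
    · exact h4 c h5
  · intro h
    have h1 : List.dropWhile PySem.Chars.isspace l = [] := List.dropWhile_eq_nil_iff.mpr h
    simp [h1]

-- strip ignores an all-whitespace prefix
theorem pvStrip_ws_append (w t : List Char) (hw : ∀ c ∈ w, PySem.Chars.isspace c = true) :
    PySem.Chars.strip (w ++ t) = PySem.Chars.strip t := by
  simp only [PySem.Chars.strip, PySem.Chars.lstrip, List.dropWhile_append,
    List.dropWhile_eq_nil_iff.mpr hw, List.isEmpty_nil, if_true]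

-- rstrip ignores an all-whitespace suffix
theorem pvRstrip_append_ws (t w : List Char) (hw : ∀ c ∈ w, PySem.Chars.isspace c = true) :
    PySem.Chars.rstrip (t ++ w) = PySem.Chars.rstrip t := by
  have hw' : List.dropWhile PySem.Chars.isspace w.reverse = [] :=
    List.dropWhile_eq_nil_iff.mpr (fun x hx => hw x (List.mem_reverse.mp hx))
  simp only [PySem.Chars.rstrip, List.reverse_append, List.dropWhile_append, hw']
  simp

-- strip ignores an all-whitespace suffix
theorem pvStrip_append_ws (t w : List Char) (hw : ∀ c ∈ w, PySem.Chars.isspace c = true) :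
    PySem.Chars.strip (t ++ w) = PySem.Chars.strip t := by
  by_cases ht : List.dropWhile PySem.Chars.isspace t = []
  · have htw : ∀ c ∈ t, PySem.Chars.isspace c = true := List.dropWhile_eq_nil_iff.mp ht
    have h1 : pvBlankC (t ++ w) = true := (pvBlankC_iff _).mpr (by
      intro c hc; rcases List.mem_append.mp hc with h | h
      · exact htw c h
      · exact hw c h)
    have h2 : pvBlankC t = true := (pvBlankC_iff _).mpr htw
    simpa [pvBlankC] using (beq_iff_eq.mp h1).trans (beq_iff_eq.mp h2).symm
  · have hl : PySem.Chars.lstrip (t ++ w) = PySem.Chars.lstrip t ++ w := by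
      simp only [PySem.Chars.lstrip, List.dropWhile_append]
      simp [List.isEmpty_iff, ht]
    simp only [PySem.Chars.strip]
    rw [hl]
    exact pvRstrip_append_ws _ _ hw

theorem pvJoin_append_singleton (ms : List (List Char)) (l : List Char) (h : ms ≠ []) :
    PySem.Chars.join ['\n'] (ms ++ [l]) = PySem.Chars.join ['\n'] ms ++ '\n' :: l := by
  induction ms with
  | nil => exact absurd rfl h
  | cons a ms ih =>
    cases ms with
    | nil =>
      rw [List.singleton_append, PySem.Chars.join_cons_cons, PySem.Chars.join_singleton,
        PySem.Chars.join_singleton]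
      simp
    | cons b ms' =>
      rw [show (a :: b :: ms') ++ [l] = a :: b :: (ms' ++ [l]) from by simp,
        PySem.Chars.join_cons_cons,
        show b :: (ms' ++ [l]) = (b :: ms') ++ [l] from by simp,
        ih (by simp), PySem.Chars.join_cons_cons]
      simp

-- dropping one blank line at the front does not change strip-of-join
theorem pvFront_one (l : List Char) (ms : List (List Char)) (hl : pvBlankC l = true) :
    PySem.Chars.strip (PySem.Chars.join ['\n'] (l :: ms)) =
      PySem.Chars.strip (PySem.Chars.join ['\n'] ms) := by
  have hws := (pvBlankC_iff l).mp hl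
  cases ms with
  | nil =>
    simp only [PySem.Chars.join, List.intercalate]
    simpa [pvBlankC] using hl
  | cons m ms' =>
    rw [PySem.Chars.join_cons_cons, show l ++ ['\n'] ++ PySem.Chars.join ['\n'] (m :: ms')
        = (l ++ ['\n']) ++ PySem.Chars.join ['\n'] (m :: ms') from by simp]
    exact pvStrip_ws_append _ _ (by
      intro c hc; rcases List.mem_append.mp hc with h | h
      · exact hws c h
      · simp at h; subst h; rfl)

-- dropping one blank line at the back does not change strip-of-join
theorem pvBack_one (ms : List (List Char)) (l : List Char) (hl : pvBlankC l = true) :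
    PySem.Chars.strip (PySem.Chars.join ['\n'] (ms ++ [l])) =
      PySem.Chars.strip (PySem.Chars.join ['\n'] ms) := by
  have hws := (pvBlankC_iff l).mp hl
  cases hms : ms with
  | nil =>
    simp only [List.nil_append, PySem.Chars.join, List.intercalate]
    simpa [pvBlankC] using hl
  | cons a ms' =>
    rw [← hms, pvJoin_append_singleton ms l (by simp [hms])]
    exact pvStrip_append_ws _ _ (by
      intro c hc; simp at hc
      rcases hc with h | h
      · subst h; rfl
      · exact hws c h)

theorem pvFront_all (ls : List (List Char)) :
    PySem.Chars.strip (PySem.Chars.join ['\n'] (List.dropWhile pvBlankC ls)) =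
      PySem.Chars.strip (PySem.Chars.join ['\n'] ls) := by
  induction ls with
  | nil => rfl
  | cons l ms ih =>
    by_cases hl : pvBlankC l = true
    · rw [List.dropWhile_cons_of_pos hl, ih, pvFront_one l ms hl]
    · rw [List.dropWhile_cons_of_neg hl]

theorem pvBack_all (ls : List (List Char)) :
    PySem.Chars.strip (PySem.Chars.join ['\n'] (List.dropWhile pvBlankC ls.reverse).reverse) =
      PySem.Chars.strip (PySem.Chars.join ['\n'] ls) := by
  induction ls using List.reverseRecOn with
  | nil => rfl
  | append_singleton ms l ih =>
    by_cases hl : pvBlankC l = true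
    · rw [List.reverse_append, List.reverse_singleton, List.singleton_append,
        List.dropWhile_cons_of_pos hl, ih, pvBack_one ms l hl]
    · rw [List.reverse_append, List.reverse_singleton, List.singleton_append,
        List.dropWhile_cons_of_neg hl]
      simp

-- start loop: dropping the computed prefix is dropWhile
theorem pvStartloop_spec (raw_lines : List String) :
    ∀ start, start ≤ raw_lines.length →
      start ≤ parse_string_section_startloop raw_lines raw_lines.length start ∧
      parse_string_section_startloop raw_lines raw_lines.length start ≤ raw_lines.length ∧
      raw_lines.drop (parse_string_section_startloop raw_lines raw_lines.length start) =
        List.dropWhile pvBlankS (raw_lines.drop start) := by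
  intro start
  induction hn : raw_lines.length - start using Nat.strong_induction_on generalizing start with
  | _ n ih =>
    intro hle
    rw [parse_string_section_startloop]
    by_cases h : start < raw_lines.length
    · rw [dif_pos h]
      have hget : (PySem.List.pyGet? raw_lines (start : Int)).getD "" = raw_lines[start] := by
        rw [PySem.List.pyGet?_natCast, List.getElem?_eq_getElem h]; rfl
      rw [List.drop_eq_getElem_cons h]
      by_cases hb : pvBlankS raw_lines[start] = true
      · rw [if_pos (by rw [hget]; exact hb), List.dropWhile_cons_of_pos hb]
        have := ih (raw_lines.length - (start + 1)) (by omega) (start + 1) rfl (by omega)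
        exact ⟨by omega, this.2.1, this.2.2⟩
      · rw [if_neg (by rw [hget]; exact hb), List.dropWhile_cons_of_neg hb]
        exact ⟨le_refl _, le_of_lt h, List.drop_eq_getElem_cons h⟩
    · rw [dif_neg h]
      have : start = raw_lines.length := le_antisymm hle (le_of_not_gt h)
      subst this
      simp

-- end loop: taking up to the computed end is reverse-dropWhile-reverse
theorem pvEndloop_spec (raw_lines : List String) (start : Nat) (hs : start ≤ raw_lines.length) :
    ∀ endv, start ≤ endv → endv ≤ raw_lines.length →
      start ≤ parse_string_section_endloop raw_lines start endv ∧
      parse_string_section_endloop raw_lines start endv ≤ endv ∧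
      (raw_lines.drop start).take (parse_string_section_endloop raw_lines start endv - start) =
        (List.dropWhile pvBlankS ((raw_lines.drop start).take (endv - start)).reverse).reverse := by
  intro endv
  induction endv with
  | zero =>
    intro h1 h2
    rw [parse_string_section_endloop, dif_neg (by omega)]
    have : start = 0 := by omega
    subst this
    simp
  | succ e ih =>
    intro h1 h2
    rw [parse_string_section_endloop]
    by_cases h : start < e + 1
    · rw [dif_pos h]
      have he : e < raw_lines.length := by omega
      have hget : (PySem.List.pyGet? raw_lines ((↑(e + 1) : Int) - 1)).getD "" = raw_lines[e] := by
        have : ((↑(e + 1) : Int) - 1) = (e : Int) := by push_cast; ring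
        rw [this, PySem.List.pyGet?_natCast, List.getElem?_eq_getElem he]; rfl
      have htake : (raw_lines.drop start).take (e + 1 - start) =
          (raw_lines.drop start).take (e - start) ++ [raw_lines[e]] := by
        have h3 : e + 1 - start = (e - start) + 1 := by omega
        rw [h3, List.take_add_one]
        congr 1
        have h4 : (raw_lines.drop start)[e - start]? = some raw_lines[e] := by
          rw [List.getElem?_drop, List.getElem?_eq_getElem (by omega)]
          congr 1
          congr 1
          omega
        simp [h4]
      by_cases hb : pvBlankS raw_lines[e] = true
      · rw [if_pos (by rw [hget]; exact hb)]
        simp only [Nat.add_sub_cancel]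
        have hrec := ih (by omega) (by omega)
        refine ⟨hrec.1, by omega, ?_⟩
        rw [hrec.2.2, htake, List.reverse_append, List.reverse_singleton, List.singleton_append,
          List.dropWhile_cons_of_pos hb]
      · rw [if_neg (by rw [hget]; exact hb)]
        refine ⟨by omega, le_refl _, ?_⟩
        rw [htake, List.reverse_append, List.reverse_singleton, List.singleton_append,
          List.dropWhile_cons_of_neg hb]
        simp
    · rw [dif_neg h]
      have : start = e + 1 := by omega
      subst this
      simp

-- ===== VERDICT (by name: the statement is the Claim_ definition above) =====
set_option maxHeartbeats 2000000 in
theorem parse_string_section_spec : Claim_equal_parse_string_section := by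
  intro raw_lines _
  unfold Spec_parse_string_section parse_string_section parse_string_section_alt
  have hS := pvStartloop_spec raw_lines 0 (Nat.zero_le _)
  set start := parse_string_section_startloop raw_lines raw_lines.length 0 with hstart
  have hE := pvEndloop_spec raw_lines start hS.2.1 raw_lines.length hS.2.1 (le_refl _)
  set endv := parse_string_section_endloop raw_lines start raw_lines.length with hendv
  have hd : raw_lines.drop start = List.dropWhile pvBlankS raw_lines := by
    simpa using hS.2.2
  have hslice : PySem.List.slice raw_lines (some (start : Int)) (some (endv : Int)) =
      (List.dropWhile pvBlankS (List.dropWhile pvBlankS raw_lines).reverse).reverse := by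
    rw [PySem.List.slice_natCast]
    have h1 : (raw_lines.drop start).take (raw_lines.length - start) = raw_lines.drop start := by
      apply List.take_of_length_le
      simp
    rw [hE.2.2, h1, hd]
  rw [hslice]
  -- move to the List Char level
  have hP : pvBlankS = pvBlankC ∘ String.toList := funext pvBlankS_eq
  have hmapdrop : ∀ xs : List String,
      List.map String.toList (List.dropWhile pvBlankS xs) =
        List.dropWhile pvBlankC (List.map String.toList xs) := by
    intro xs
    rw [List.dropWhile_map, hP]
  simp only [PySem.Str.strip]
  congr 1
  rw [PySem.Str.toList_join, PySem.Str.toList_join]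
  have hnl : ("\n" : String).toList = ['\n'] := rfl
  rw [hnl]
  rw [List.map_reverse, hmapdrop, List.map_reverse, hmapdrop]
  rw [pvBack_all, pvFront_all]
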